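-- pv_equiv track=rewrite | github.com/twotwobread/coding_test_study | HaeYeon-Won/6주차/[2133번]타일채우기.py | solution
-- ===== SOURCE A (Python) =====
-- def solution(n):
--     if n%2!=0:
--         return 0
--     dp = [0 for _ in range(16)] # 1번 idx => 실제 2번 idx
--     if n ==2:
--         return 3
--     dp[1]=3
--     for i in range(2,16):
--         dp[i]+=(3*dp[i-1]+2)
--         pointer = i-2
--         while pointer>=1:
--             dp[i]+=(2*dp[pointer])
--             pointer-=1
--         if i==n//2:
--             return dp[n//2]
-- ===== SOURCE B (Python) =====
-- def solution(n):
--     if n % 2 != 0: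
--         return 0
--     a, b = 1, 3
--     for _ in range(n // 2 - 1):
--         a, b = b, 4 * b - a
--     return b
-- ===== Notes on version B (the rewrite author's own statement) =====
-- stated objective: simpler
-- what changed: Replaces A's size-16 DP table with a quadratic inner while-loop summation by a two-variable iteration of the linear recurrence t(k) = 4*t(k-1) - t(k-2), t(0)=1, t(1)=3, with no table, no special case for n==2 and no hard cap at n=30.
-- outside the precondition, e.g. on solution(0): A returns None, B returns 3; on solution(32): A returns None, B returns 1117014753; on solution(-2): A returns None, B returns 3
import Mathlib
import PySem

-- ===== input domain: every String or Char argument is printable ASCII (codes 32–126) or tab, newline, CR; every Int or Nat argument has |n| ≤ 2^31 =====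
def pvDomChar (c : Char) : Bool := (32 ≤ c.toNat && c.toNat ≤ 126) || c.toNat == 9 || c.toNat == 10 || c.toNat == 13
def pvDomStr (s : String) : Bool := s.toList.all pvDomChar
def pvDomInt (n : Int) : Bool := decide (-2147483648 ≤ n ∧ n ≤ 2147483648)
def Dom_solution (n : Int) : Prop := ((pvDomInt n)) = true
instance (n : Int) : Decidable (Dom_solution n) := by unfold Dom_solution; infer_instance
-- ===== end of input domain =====

-- B replaces A's capped 16-entry table with quadratic inner summation by a two-variable
-- iteration of the linear recurrence t(k) = 4*t(k-1) - t(k-2) (objective: simpler).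

-- ===== PORT A =====
-- while pointer>=1: dp[i] += 2*dp[pointer]; pointer -= 1
def solutionWhile (dp : List Int) (p : Nat) (acc : Int) : Int :=
  match p with
  | 0 => acc
  | q + 1 => solutionWhile dp q (acc + 2 * dp.getD (q + 1) 0)

-- for i in range(2,16): …; if i == n//2: return dp[n//2]
-- fuel counts the iterations left of range(2,16); it runs out exactly when the Python
-- for-loop ends and the function returns None (those inputs are excluded by Pre_solution)
def solutionLoop (dp : List Int) (n : Int) (i : Nat) : Nat → Int
  | 0 => 0
  | fuel + 1 =>
    let v := dp.getD i 0 + (3 * dp.getD (i - 1) 0 + 2)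
    let v := solutionWhile dp (i - 2) v
    let dp' := dp.set i v
    if (i : Int) = PySem.Int.floordiv n 2 then dp'.getD i 0
    else solutionLoop dp' n (i + 1) fuel

def solution (n : Int) : Int :=
  if PySem.Int.mod n 2 ≠ 0 then
    0
  else
    let dp := List.replicate 16 (0 : Int)
    if n = 2 then 3
    else
      let dp := dp.set 1 3
      solutionLoop dp n 2 14

-- ===== PORT B =====
def solutionAltLoop : Nat → Int → Int → Int
  | 0, _, b => b
  | k + 1, a, b => solutionAltLoop k b (4 * b - a)

def solution_alt (n : Int) : Int :=
  if PySem.Int.mod n 2 ≠ 0 then 0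
  else solutionAltLoop (PySem.Int.floordiv n 2 - 1).toNat 1 3

-- ===== PRECONDITION & SPEC =====
-- Pre_ excludes even n outside 2..30 (n = 0, negative even, even n ≥ 32): there A falls off
-- its size-16 table loop and returns None, not an int, while B returns the recurrence value.
def Pre_solution (n : Int) : Prop := PySem.Int.mod n 2 ≠ 0 ∨ n = 2 ∨ (4 ≤ n ∧ n ≤ 30)
instance (n : Int) : Decidable (Pre_solution n) := by unfold Pre_solution; infer_instance
def pvWitness_solution : Int := 12

def Spec_solution (n : Int) (out : Int) : Prop := out = solution_alt n
instance (n : Int) (out : Int) : Decidable (Spec_solution n out) := by unfold Spec_solution; infer_instance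

-- ===== CLAIM (what is proved, stated in full; the proofs are below) =====
def Claim_equal_solution : Prop := ∀ (n : Int), Dom_solution n → Pre_solution n → Spec_solution n (solution n)

-- ===== LEMMAS AND PROOFS =====
theorem solution_odd (n : Int) (h : PySem.Int.mod n 2 ≠ 0) :
    solution n = 0 ∧ solution_alt n = 0 := by
  unfold solution solution_alt
  rw [if_pos h, if_pos h]
  exact ⟨rfl, rfl⟩

-- ===== VERDICT (by name: the statement is the Claim_ definition above) =====
theorem solution_spec : Claim_equal_solution := by
  intro n _ hpre
  unfold Spec_solution
  by_cases h : PySem.Int.mod n 2 = 0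
  · rcases hpre with h1 | h2 | ⟨h3, h4⟩
    · exact absurd h h1
    · subst h2; decide
    · interval_cases n <;> decide
  · obtain ⟨ha, hb⟩ := solution_odd n h
    rw [ha, hb]
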